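-- pv_equiv track=rewrite | github.com/raj713335/LeetCode | Easy/3450 Maximum Students on a Single Bench.py | maxStudentsOnBench
-- ===== SOURCE A (Python) =====
-- from typing import List
--
-- def maxStudentsOnBench(students: List[List[int]]) -> int:
--
--     dictx = {}
--
--     for student, bench in students:
--         if bench not in dictx:
--             dictx[bench] = [student]
--         else:
--             dictx[bench].append(student)
--
--     max_students = 0
--
--     for value in dictx.values():
--         temp = len(set(value))
--
--         if temp > max_students:
--             max_students = temp
--
--     return max_students
-- ===== SOURCE B (Python) =====
-- from typing import List
--
-- def maxStudentsOnBench(students: List[List[int]]) -> int: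
--     best = 0
--     rest = students
--     while rest:
--         bench = rest[0][1]
--         here = len({s for s, b in rest if b == bench})
--         if here > best:
--             best = here
--         rest = [[s, b] for s, b in rest if b != bench]
--     return best
-- ===== Notes on version B (the rewrite author's own statement) =====
-- stated objective: alternative
-- what changed: Replaces the dict-of-student-lists grouping by an iterative partition: repeatedly take the first remaining row's bench, count that bench's distinct students with one set, drop all rows of that bench, and keep a running max -- no dictionary at all.
import Mathlib
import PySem

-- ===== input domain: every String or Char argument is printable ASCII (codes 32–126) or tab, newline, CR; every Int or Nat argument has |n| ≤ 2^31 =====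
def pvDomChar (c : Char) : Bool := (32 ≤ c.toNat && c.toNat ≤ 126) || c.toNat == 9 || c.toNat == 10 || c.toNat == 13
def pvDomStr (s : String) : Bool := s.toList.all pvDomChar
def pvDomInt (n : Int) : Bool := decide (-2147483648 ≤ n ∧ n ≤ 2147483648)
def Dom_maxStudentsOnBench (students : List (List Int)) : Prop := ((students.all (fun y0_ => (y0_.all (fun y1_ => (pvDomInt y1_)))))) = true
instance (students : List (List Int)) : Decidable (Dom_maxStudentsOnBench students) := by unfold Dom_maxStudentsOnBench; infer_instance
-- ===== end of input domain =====

-- B replaces A's dict-of-student-lists grouping by an iterative partition with no dictionary: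
-- repeatedly take the first remaining row's bench, count that bench's distinct students with one
-- set, drop all rows of that bench, keep a running max (alternative decomposition; same results).

-- rows of length 2 as pairs; rows of any other shape make Python's unpacking raise (outside Pre_)
def pvToPair (row : List Int) : Option (Int × Int) :=
  match row with
  | [s, b] => some (s, b)
  | _ => none

-- ===== PORT A =====
-- dictx[bench].append(student) mutates the stored list in place: ported as Dict.modify
-- (its dflt [] is never used on that branch, since the key is present).
def maxStudentsOnBench (students : List (List Int)) : Int :=
  let dictx : PySem.Dict Int (List Int) :=
    students.foldl (fun dictx row =>
      match row with
      | [student, bench] =>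
          if dictx.contains bench = false then dictx.insert bench [student]
          else dictx.modify bench [] (fun v => v ++ [student])
      | _ => dictx) PySem.Dict.empty
  dictx.values.foldl (fun max_students value =>
      let temp := PySem.Set.len (PySem.Set.ofList value)
      if temp > max_students then temp else max_students) 0

-- ===== PORT B =====
-- rest[0][1]: the bench of a row (rows outside Pre_ have no second element; 0 is never used under Pre_)
def pvSnd (row : List Int) : Int :=
  match row with
  | [_, b] => b
  | _ => 0

-- termination of the while loop: each pass drops at least the first remaining row
theorem pv_rest_len (row : List Int) (t : List (List Int)) :
    ((((row :: t).filterMap pvToPair).filter (fun p => p.2 != pvSnd row)).map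
        (fun p => [p.1, p.2])).length < (row :: t).length := by
  rw [List.length_map]
  rcases row with _ | ⟨a, _ | ⟨b, _ | ⟨c, r⟩⟩⟩ <;>
    simp only [List.filterMap_cons, pvToPair, pvSnd, List.length_cons] <;>
    first
      | exact Nat.lt_succ_of_le (le_trans (List.length_filter_le _ _) (List.length_filterMap_le _ _))
      | · rw [List.filter_cons]
          simp only [bne_self_eq_false, Bool.false_eq_true, if_false]
          exact Nat.lt_succ_of_le (le_trans (List.length_filter_le _ _) (List.length_filterMap_le _ _))

-- the while loop: best = running max, rest = rows not yet assigned to a processed bench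
def pvAltLoop (best : Int) (rest : List (List Int)) : Int :=
  match rest with
  | [] => best
  | row :: t =>
    -- bench = rest[0][1]
    let bench : Int := pvSnd row
    -- here = len({s for s, b in rest if b == bench})
    let here : Int :=
      ((PySem.Set.ofList ((((row :: t).filterMap pvToPair).filter (fun p => p.2 == bench)).map (fun p => p.1))).length : Int)
    let best' := if here > best then here else best
    -- rest = [[s, b] for s, b in rest if b != bench]
    pvAltLoop best' ((((row :: t).filterMap pvToPair).filter (fun p => p.2 != bench)).map (fun p => [p.1, p.2]))
termination_by rest.length
decreasing_by
  exact pv_rest_len row t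

def maxStudentsOnBench_alt (students : List (List Int)) : Int :=
  pvAltLoop 0 students

-- ===== PRECONDITION & SPEC =====
-- Python A unpacks 'student, bench = row' and raises ValueError on any row whose length is not 2.
def Pre_maxStudentsOnBench (students : List (List Int)) : Prop :=
  ∀ row ∈ students, row.length = 2
instance (students : List (List Int)) : Decidable (Pre_maxStudentsOnBench students) := by unfold Pre_maxStudentsOnBench; infer_instance
def pvWitness_maxStudentsOnBench : List (List Int) := [[1, 2], [3, 2], [1, 2], [3, 7]]

def Spec_maxStudentsOnBench (students : List (List Int)) (out : Int) : Prop := out = maxStudentsOnBench_alt students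
instance (students : List (List Int)) (out : Int) : Decidable (Spec_maxStudentsOnBench students out) := by unfold Spec_maxStudentsOnBench; infer_instance

-- ===== CLAIM (what is proved, stated in full; the proofs are below) =====
def Claim_equal_maxStudentsOnBench : Prop := ∀ (students : List (List Int)), Dom_maxStudentsOnBench students → Pre_maxStudentsOnBench students → Spec_maxStudentsOnBench students (maxStudentsOnBench students)

-- ===== LEMMAS AND PROOFS =====

-- Python's running-max update as max
theorem pv_if_max (acc x : Int) : (if x > acc then x else acc) = max acc x := by
  rcases le_or_gt x acc with hle | hlt
  · rw [if_neg (by omega), max_eq_left hle]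
  · rw [if_pos hlt, max_eq_right (le_of_lt hlt)]

-- distinct students of bench b among the pairs prs
def pvCnt (prs : List (Int × Int)) (b : Int) : Int :=
  ((PySem.Set.ofList ((prs.filter (fun p => p.2 == b)).map (fun p => p.1))).length : Int)

-- the loop on pair lists (what pvAltLoop computes once the rows are pairs)
def pvBLoop (best : Int) (l : List (Int × Int)) : Int :=
  match l with
  | [] => best
  | p :: t => pvBLoop (max best (pvCnt (p :: t) p.2)) ((p :: t).filter (fun q => q.2 != p.2))
termination_by l.length
decreasing_by
  simp only [List.filter_cons, bne_self_eq_false, Bool.false_eq_true, if_false, List.length_cons]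
  exact Nat.lt_succ_of_le (List.length_filter_le _ _)

-- a fold whose step pattern-matches a row [s, b] is a fold over the filterMapped pairs
theorem pv_foldl_rows {sigma : Type} (g : sigma → Int × Int → sigma) (init : sigma) (l : List (List Int)) :
    l.foldl (fun acc row =>
      match row with
      | [s, b] => g acc (s, b)
      | _ => acc) init
      = (l.filterMap pvToPair).foldl g init := by
  rw [List.foldl_filterMap]
  refine PySem.List.foldl_congr_mem _ _ _ _ ?_
  intro acc row _
  rcases row with _ | ⟨a, _ | ⟨b, _ | ⟨c, t⟩⟩⟩ <;> rfl

-- round trip: the rebuilt rows [[s, b], …] parse back to exactly the same pairs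
theorem pv_roundtrip (l : List (Int × Int)) :
    (l.map (fun p => [p.1, p.2])).filterMap pvToPair = l := by
  induction l with
  | nil => rfl
  | cons p t ih =>
    show ((p.1, p.2) : Int × Int) :: (t.map (fun p => [p.1, p.2])).filterMap pvToPair = p :: t
    rw [ih]

-- dedup commutes with filter
theorem pv_filter_ofList {alpha : Type} [BEq alpha] [LawfulBEq alpha] (q : alpha → Bool) (l : List alpha) :
    (PySem.Set.ofList l).filter q = PySem.Set.ofList (l.filter q) := by
  induction l using List.reverseRecOn with
  | nil => rfl
  | append_singleton xs x ih =>
    rw [PySem.Set.ofList_append_singleton, PySem.Set.add_eq_ite, List.filter_append]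
    by_cases hq : q x
    · have hfx : List.filter q [x] = [x] := by simp [hq]
      rw [hfx, PySem.Set.ofList_append_singleton, PySem.Set.add_eq_ite]
      by_cases hx : x ∈ xs
      · rw [if_pos (by simpa [PySem.Set.mem_ofList] using hx),
            if_pos (by simp [PySem.Set.mem_ofList, List.mem_filter, hx, hq]), ih]
      · rw [if_neg (by simpa [PySem.Set.mem_ofList] using hx),
            if_neg (by simp [PySem.Set.mem_ofList, List.mem_filter, hx]), List.filter_append, ih, hfx]
    · have hfx : List.filter q [x] = [] := by simp [hq]
      rw [hfx, List.append_nil]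
      by_cases hx : x ∈ xs
      · rw [if_pos (by simpa [PySem.Set.mem_ofList] using hx), ih]
      · rw [if_neg (by simpa [PySem.Set.mem_ofList] using hx), List.filter_append, ih, hfx, List.append_nil]

-- the benches of p :: t, in first-occurrence order, split off p.2
theorem pv_benches_cons (p : Int × Int) (t : List (Int × Int)) :
    PySem.Set.ofList (((p :: t).map (fun q => q.2))) =
      p.2 :: PySem.Set.ofList ((t.filter (fun q => q.2 != p.2)).map (fun q => q.2)) := by
  rw [List.map_cons, PySem.Set.ofList_cons]
  congr 1
  have hd : PySem.Set.discard (PySem.Set.ofList (t.map (fun q => q.2))) p.2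
      = (PySem.Set.ofList (t.map (fun q => q.2))).filter (fun y => y != p.2) := rfl
  rw [hd, pv_filter_ofList, List.filter_map]
  rfl

-- pvCnt is unchanged by dropping the rows of a different bench
theorem pv_cnt_filter (l : List (Int × Int)) (c b : Int) (hne : b ≠ c) :
    pvCnt (l.filter (fun q => q.2 != c)) b = pvCnt l b := by
  have hf : (l.filter (fun q => q.2 != c)).filter (fun p => p.2 == b)
      = l.filter (fun p => p.2 == b) := by
    rw [List.filter_filter]
    refine List.filter_congr ?_
    intro q _
    by_cases hq : q.2 = b
    · simp [hq, hne]
    · simp [hq]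
  unfold pvCnt
  rw [hf]

-- pvCnt ignores a leading row of a different bench
theorem pv_cnt_cons_ne (p : Int × Int) (t : List (Int × Int)) (b : Int) (hne : b ≠ p.2) :
    pvCnt (p :: t) b = pvCnt t b := by
  unfold pvCnt
  rw [List.filter_cons]
  simp [Ne.symm hne]

-- the loop computes the running max over the benches in first-occurrence order
theorem pv_bloop_spec (n : Nat) : ∀ (l : List (Int × Int)) (best : Int), l.length = n →
    pvBLoop best l
      = (PySem.Set.ofList (l.map (fun q => q.2))).foldl (fun acc b => max acc (pvCnt l b)) best := by
  induction n using Nat.strong_induction_on with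
  | _ n ih =>
    intro l best hn
    match l with
    | [] => rw [pvBLoop]; rfl
    | p :: t =>
      rw [pvBLoop, pv_benches_cons, List.foldl_cons]
      have hfl : (p :: t).filter (fun q => q.2 != p.2) = t.filter (fun q => q.2 != p.2) := by
        simp
      have hlen : ((p :: t).filter (fun q => q.2 != p.2)).length < n := by
        rw [hfl, ← hn, List.length_cons]
        exact Nat.lt_succ_of_le (List.length_filter_le _ _)
      rw [ih _ hlen _ _ rfl]
      rw [hfl]
      refine PySem.List.foldl_congr_mem _ _ _ _ ?_
      intro acc b hb
      have hbne : b ≠ p.2 := by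
        rcases List.mem_map.mp ((PySem.Set.mem_ofList _ _).mp hb) with ⟨q, hq, rfl⟩
        have := (List.mem_filter.mp hq).2
        simpa using this
      rw [pv_cnt_filter _ _ _ hbne, pv_cnt_cons_ne _ _ _ hbne]

-- the unfolding of pvBLoop on a cons
theorem pv_bloop_cons (best : Int) (p : Int × Int) (t : List (Int × Int)) :
    pvBLoop best (p :: t)
      = pvBLoop (max best (pvCnt (p :: t) p.2)) ((p :: t).filter (fun q => q.2 != p.2)) := by
  rw [pvBLoop.eq_def]

-- under Pre_, the row loop pvAltLoop is the pair loop pvBLoop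
theorem pv_alt_eq_bloop (n : Nat) : ∀ (rest : List (List Int)) (best : Int), rest.length = n →
    (∀ row ∈ rest, row.length = 2) →
    pvAltLoop best rest = pvBLoop best (rest.filterMap pvToPair) := by
  induction n using Nat.strong_induction_on with
  | _ n ih =>
    intro rest best hn h
    match rest with
    | [] =>
      rw [pvAltLoop, show (List.filterMap pvToPair ([] : List (List Int))) = [] from rfl, pvBLoop]
    | row :: t =>
      obtain ⟨s, b, rfl⟩ : ∃ s b, row = [s, b] := by
        have h2 := h row (List.mem_cons_self)
        rcases row with _ | ⟨x, _ | ⟨y, _ | ⟨z, r⟩⟩⟩ <;> simp_all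
      have hpt : ([s, b] :: t).filterMap pvToPair = (s, b) :: t.filterMap pvToPair := rfl
      rw [pvAltLoop, hpt, pv_bloop_cons]
      have hrows : ∀ r ∈ ((((s, b) :: t.filterMap pvToPair).filter (fun p => p.2 != b)).map
          (fun p => [p.1, p.2])), r.length = 2 := by
        intro r hr
        rcases List.mem_map.mp hr with ⟨q, _, rfl⟩
        rfl
      have hlen : (((((s, b) :: t.filterMap pvToPair)).filter (fun p => p.2 != b)).map
          (fun p => [p.1, p.2])).length < n := by
        rw [List.length_map, ← hn, List.length_cons, List.filter_cons]
        simp only [bne_self_eq_false, Bool.false_eq_true, if_false]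
        exact Nat.lt_succ_of_le (le_trans (List.length_filter_le _ _) (List.length_filterMap_le _ _))
      show pvAltLoop (if ((PySem.Set.ofList ((((s, b) :: t.filterMap pvToPair).filter
            (fun p => p.2 == b)).map (fun p => p.1))).length : Int) > best
          then ((PySem.Set.ofList ((((s, b) :: t.filterMap pvToPair).filter
            (fun p => p.2 == b)).map (fun p => p.1))).length : Int) else best)
          ((((s, b) :: t.filterMap pvToPair).filter (fun p => p.2 != b)).map (fun p => [p.1, p.2]))
        = pvBLoop (max best (pvCnt ((s, b) :: t.filterMap pvToPair) b))
            (((s, b) :: t.filterMap pvToPair).filter (fun q => q.2 != b))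
      rw [ih _ hlen _ _ rfl hrows, pv_roundtrip, pv_if_max]
      rfl

-- main equality (A side reuses the dict characterisation; B side the loop characterisation)
theorem pv_main (students : List (List Int)) (hpre : ∀ row ∈ students, row.length = 2) :
    maxStudentsOnBench students = maxStudentsOnBench_alt students := by
  unfold maxStudentsOnBench maxStudentsOnBench_alt
  simp only []
  set prs := students.filterMap pvToPair with hprs
  -- ===== A side: the dict's values are, bench by bench, that bench's students =====
  have hA1 : (students.foldl (fun dictx row =>
      match row with
      | [student, bench] =>
          if dictx.contains bench = false then dictx.insert bench [student]
          else dictx.modify bench [] (fun v => v ++ [student])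
      | _ => dictx) PySem.Dict.empty)
      = (prs.map (fun p => (p.2, p.1))).foldl
          (fun d q => d.modify q.1 [] (fun v => v ++ [q.2])) PySem.Dict.empty := by
    rw [List.foldl_map,
        ← pv_foldl_rows (g := fun d (p : Int × Int) => PySem.Dict.modify d p.2 [] (fun v => v ++ [p.1]))]
    refine PySem.List.foldl_congr_mem _ _ _ _ ?_
    intro d row _
    rcases row with _ | ⟨a, _ | ⟨b, _ | ⟨c, t⟩⟩⟩ <;> try rfl
    show (if d.contains b = false then d.insert b [a] else d.modify b [] (fun v => v ++ [a]))
        = d.modify b [] (fun v => v ++ [a])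
    by_cases hc : d.contains b
    · simp [hc]
    · rw [if_pos (eq_false_of_ne_true hc)]
      simp [PySem.Dict.modify, PySem.Dict.getD_of_not_contains, eq_false_of_ne_true hc]
  set D := (prs.map (fun p => (p.2, p.1))).foldl
      (fun d q => d.modify q.1 [] (fun v => v ++ [q.2])) PySem.Dict.empty with hD
  rw [hA1]
  have hKeys : D.keys = PySem.Set.ofList (prs.map (fun p => p.2)) := by
    have h := PySem.Dict.keys_foldl_modify_key (l := prs.map (fun p => (p.2, p.1)))
      (key := fun q => q.1) (d0 := ([] : List Int)) (f := fun _ q => fun v => v ++ [q.2])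
      (d := (PySem.Dict.empty : PySem.Dict Int (List Int)))
    rw [hD]
    rw [h, List.map_map, PySem.Set.ofList_eq_foldl]
    rfl
  have hGet : ∀ b, D.getD b [] = (prs.filter (fun p => p.2 == b)).map (fun p => p.1) := by
    intro b
    rw [hD, PySem.Dict.getD_foldl_modify_append, PySem.Dict.getD_empty, List.nil_append,
        List.filter_map, List.map_map]
    rfl
  have hnd : D.keys.Nodup := by rw [hKeys]; exact PySem.Set.nodup_ofList _
  have hVal : D.values = (PySem.Set.ofList (prs.map (fun p => p.2))).map
      (fun b => (prs.filter (fun p => p.2 == b)).map (fun p => p.1)) := by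
    rw [PySem.Dict.values_eq_map_keys D hnd [], hKeys]
    exact List.map_congr_left (fun b _ => hGet b)
  rw [hVal]
  -- ===== B side =====
  rw [pv_alt_eq_bloop students.length students 0 rfl hpre,
      pv_bloop_spec prs.length prs 0 rfl]
  -- ===== bridge: both are the running max of pvCnt over the benches =====
  rw [List.foldl_map]
  refine PySem.List.foldl_congr_mem _ _ _ _ ?_
  intro acc b _
  show (let temp := PySem.Set.len (PySem.Set.ofList ((prs.filter (fun p => p.2 == b)).map (fun p => p.1)));
        if temp > acc then temp else acc) = max acc (pvCnt prs b)
  simp only [PySem.Set.len, pvCnt]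
  rcases le_or_gt (((PySem.Set.ofList ((prs.filter (fun p => p.2 == b)).map (fun p => p.1))).length : Int)) acc with hle | hlt
  · rw [if_neg (by omega), max_eq_left hle]
  · rw [if_pos hlt, max_eq_right (le_of_lt hlt)]

-- ===== VERDICT (by name: the statement is the Claim_ definition above) =====
theorem maxStudentsOnBench_spec : Claim_equal_maxStudentsOnBench := by
  intro students _ hpre
  show maxStudentsOnBench students = maxStudentsOnBench_alt students
  exact pv_main students hpre
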